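-- pv_equiv track=rewrite | github.com/khawajanaqeeb/Q4-hackathon2-todo | phase3-chatbot/agents/multi_platform_adapter_agent.py | _convert_graphics_to_text
-- ===== SOURCE A (Python) =====
-- def _convert_graphics_to_text(content: str) -> str:
--     """Convert graphical content to text representation."""
--     # Replace graphical elements with text equivalents
--     conversions = {
--         '[BUTTON_ADD]': '(Button: Add)',
--         '[BUTTON_DELETE]': '(Button: Delete)',
--         '[PROGRESS_BAR]': '[Progress: XXXXXXXXXX]',
--         '[CHECKBOX]': '[ ]',
--         '[CHECKED_BOX]': '[X]'
--     }
--
--     for graphic, text_equiv in conversions.items():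
--         content = content.replace(graphic, text_equiv)
--
--     return content
-- ===== SOURCE B (Python) =====
-- def _convert_graphics_to_text(content: str) -> str:
--     """Convert graphical content to text representation (single left-to-right scan)."""
--     conversions = {
--         '[BUTTON_ADD]': '(Button: Add)',
--         '[BUTTON_DELETE]': '(Button: Delete)',
--         '[PROGRESS_BAR]': '[Progress: XXXXXXXXXX]',
--         '[CHECKBOX]': '[ ]',
--         '[CHECKED_BOX]': '[X]'
--     }
--
--     result = []
--     i = 0
--     while i < len(content):
--         for graphic, text_equiv in conversions.items():
--             if content.startswith(graphic, i):
--                 result.append(text_equiv)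
--                 i += len(graphic)
--                 break
--         else:
--             result.append(content[i])
--             i += 1
--     return ''.join(result)
-- ===== Notes on version B (the rewrite author's own statement) =====
-- stated objective: alternative
-- what changed: A makes five sequential full-string str.replace passes (one per token); B scans the content once left-to-right with a token table, emitting the replacement text wherever a token starts and copying characters otherwise.
import Mathlib
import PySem

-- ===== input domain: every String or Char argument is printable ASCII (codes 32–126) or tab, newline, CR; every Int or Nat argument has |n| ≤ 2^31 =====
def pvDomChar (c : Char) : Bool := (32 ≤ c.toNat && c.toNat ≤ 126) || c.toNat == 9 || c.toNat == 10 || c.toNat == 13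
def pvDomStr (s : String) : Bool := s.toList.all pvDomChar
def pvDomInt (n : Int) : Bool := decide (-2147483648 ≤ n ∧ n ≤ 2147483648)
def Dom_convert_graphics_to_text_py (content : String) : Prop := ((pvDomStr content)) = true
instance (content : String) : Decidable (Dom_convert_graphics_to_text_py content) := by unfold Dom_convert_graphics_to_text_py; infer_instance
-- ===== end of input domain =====

-- B replaces A's five sequential full-string replace passes by ONE left-to-right scan over the
-- string with a token table (objective: alternative single-pass algorithm, identical results).

-- ===== PORT A =====
def convert_graphics_to_text_py (content : String) : String :=
  let c1 := PySem.Str.replace content "[BUTTON_ADD]" "(Button: Add)"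
  let c2 := PySem.Str.replace c1 "[BUTTON_DELETE]" "(Button: Delete)"
  let c3 := PySem.Str.replace c2 "[PROGRESS_BAR]" "[Progress: XXXXXXXXXX]"
  let c4 := PySem.Str.replace c3 "[CHECKBOX]" "[ ]"
  let c5 := PySem.Str.replace c4 "[CHECKED_BOX]" "[X]"
  c5

-- ===== PORT B =====
-- B's token → text table (Python dict in insertion order)
def pvConversions : List (String × String) :=
  [("[BUTTON_ADD]", "(Button: Add)"),
   ("[BUTTON_DELETE]", "(Button: Delete)"),
   ("[PROGRESS_BAR]", "[Progress: XXXXXXXXXX]"),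
   ("[CHECKBOX]", "[ ]"),
   ("[CHECKED_BOX]", "[X]")]


-- B's inner for-loop: first table entry whose token starts at the current position
def pvTryTokens : List (String × String) → List Char → Option (List Char × Nat)
  | [], _ => none
  | (g, t) :: rest, s =>
    if g.toList.isPrefixOf s then some (t.toList, g.toList.length) else pvTryTokens rest s


-- B's while-loop over the remaining suffix of the input
def pvScan : List Char → List Char
  | [] => []
  | c :: u =>
    match pvTryTokens pvConversions (c :: u) with
    | some (rep, k) => rep ++ pvScan (List.drop (k - 1) u)
    | none => c :: pvScan u
termination_by s => s.length
decreasing_by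
  · simp only [List.length_cons, List.length_drop]; omega
  · simp



def convert_graphics_to_text_py_alt (content : String) : String :=
  String.ofList (pvScan content.toList)

-- ===== PRECONDITION & SPEC =====
def Spec_convert_graphics_to_text_py (content : String) (out : String) : Prop := out = convert_graphics_to_text_py_alt content
instance (content : String) (out : String) : Decidable (Spec_convert_graphics_to_text_py content out) := by unfold Spec_convert_graphics_to_text_py; infer_instance

-- ===== CLAIM (what is proved, stated in full; the proofs are below) =====
def Claim_equal_convert_graphics_to_text_py : Prop := ∀ (content : String), Dom_convert_graphics_to_text_py content → Spec_convert_graphics_to_text_py content (convert_graphics_to_text_py content)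

-- ===== LEMMAS AND PROOFS =====

-- Structural reformulation of PySem.Chars.replace (for a nonempty pattern)
def pvRepl (t r : List Char) : List Char → List Char
  | [] => []
  | c :: u =>
    if t.isPrefixOf (c :: u) then r ++ pvRepl t r (List.drop (t.length - 1) u)
    else c :: pvRepl t r u
termination_by s => s.length
decreasing_by
  · simp only [List.length_cons, List.length_drop]; omega
  · simp


theorem pv_go_spec (old new : List Char) (h : old ≠ []) :
    ∀ (fuel : Nat) (l acc : List Char), l.length ≤ fuel →
      PySem.Chars.replace.go old new fuel l acc = acc.reverse ++ pvRepl old new l := by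
  intro fuel
  induction fuel with
  | zero =>
    intro l acc hl
    have hl0 : l = [] := by cases l with | nil => rfl | cons a b => simp at hl
    subst hl0
    simp [PySem.Chars.replace.go, pvRepl]
  | succ n ih =>
    intro l acc hl
    cases l with
    | nil => simp [PySem.Chars.replace.go, pvRepl]
    | cons c u =>
      obtain ⟨a, t', rfl⟩ : ∃ a t', old = a :: t' := by
        cases old with | nil => exact absurd rfl h | cons a t' => exact ⟨a, t', rfl⟩
      by_cases hp : (a :: t').isPrefixOf (c :: u) = true
      · rw [PySem.Chars.replace.go]
        simp only [hp, if_pos]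
        rw [ih _ _ (by simp at hl ⊢; omega)]
        rw [pvRepl]
        simp [hp, List.drop_succ_cons]
      · rw [PySem.Chars.replace.go]
        simp only [hp]
        rw [ih u (c :: acc) (by simp at hl; omega)]
        rw [pvRepl]
        simp [hp]


theorem pv_replace_eq (s old new : List Char) (h : old ≠ []) :
    PySem.Chars.replace s old new = pvRepl old new s := by
  have hne : old.isEmpty = false := by cases old with | nil => exact absurd rfl h | cons a b => rfl
  rw [PySem.Chars.replace, if_neg (by simp [hne])]
  simpa using pv_go_spec old new h s.length s [] (le_refl _)


-- "t conflicts with u": the two lists differ at some position below both lengths,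
-- hence t is not a prefix of u ++ v for any v
def pvConflictB (t u : List Char) : Bool :=
  match t, u with
  | [], _ => false
  | _, [] => false
  | a :: t', b :: u' => a != b || pvConflictB t' u'

-- "no occurrence of t can start at any position p < u.length of u" (even spilling past u)
def pvNoStartB (t u : List Char) : Bool :=
  match u with
  | [] => true
  | _ :: u' => pvConflictB t u && pvNoStartB t u'

theorem pv_conflict_not_prefix (t u v : List Char) (h : pvConflictB t u = true) :
    ¬ t <+: u ++ v := by
  induction u generalizing t v with
  | nil => cases t with
    | nil => simp [pvConflictB] at h
    | cons a t' => simp [pvConflictB] at h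
  | cons b u' ih =>
    cases t with
    | nil => simp [pvConflictB] at h
    | cons a t' =>
      simp only [pvConflictB, Bool.or_eq_true, bne_iff_ne] at h
      intro hpre
      rw [List.cons_append] at hpre
      rcases List.cons_prefix_cons.mp hpre with ⟨rfl, hpre'⟩
      rcases h with h | h
      · exact h rfl
      · exact ih t' v h hpre'


theorem pv_factor (t r u v : List Char) (h : pvNoStartB t u = true) :
    pvRepl t r (u ++ v) = u ++ pvRepl t r v := by
  induction u with
  | nil => simp
  | cons c u' ih =>
    rw [pvNoStartB] at h
    simp only [Bool.and_eq_true] at h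
    have hnp : ¬ t <+: (c :: u') ++ v := pv_conflict_not_prefix t (c :: u') v h.1
    rw [List.cons_append] at hnp ⊢
    rw [pvRepl, if_neg (by rw [List.isPrefixOf_iff_prefix]; exact hnp)]
    rw [ih h.2, List.cons_append]


theorem pv_headMatch (t r w : List Char) (h : t ≠ []) :
    pvRepl t r (t ++ w) = r ++ pvRepl t r w := by
  obtain ⟨c, t', rfl⟩ : ∃ c t', t = c :: t' := by
    cases t with | nil => exact absurd rfl h | cons c t' => exact ⟨c, t', rfl⟩
  rw [List.cons_append, pvRepl,
    if_pos (by rw [List.isPrefixOf_iff_prefix]; exact ⟨w, by simp⟩)]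
  simp


theorem pv_headMiss (t r : List Char) (c : Char) (u : List Char) (h : ¬ t <+: c :: u) :
    pvRepl t r (c :: u) = c :: pvRepl t r u := by
  rw [pvRepl, if_neg (by rw [List.isPrefixOf_iff_prefix]; exact h)]


-- pvRepl either leaves s unchanged or agrees with s up to a position holding r's first char
theorem pv_agree (t r : List Char) (rh : Char) (hr : r[0]? = some rh) (s : List Char) :
    pvRepl t r s = s ∨
      ∃ p, (pvRepl t r s).take p = s.take p ∧ (pvRepl t r s)[p]? = some rh := by
  have hrlen : 0 < r.length := by
    rcases List.getElem?_eq_some_iff.mp hr with ⟨hlt, _⟩; omega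
  induction s using pvRepl.induct t with
  | case1 => exact Or.inl (by rw [pvRepl])
  | case2 c u hp ih =>
    refine Or.inr ⟨0, by simp, ?_⟩
    rw [pvRepl, if_pos hp, List.getElem?_append_left hrlen, hr]
  | case3 c u hp ih =>
    rw [pvRepl, if_neg hp]
    rcases ih with h | ⟨p, h1, h2⟩
    · exact Or.inl (by rw [h])
    · exact Or.inr ⟨p + 1, by simpa using h1, by simpa using h2⟩


-- all chars of T after position 0 are neither '(' nor '[' (true of the five tokens)
def pvInnerB (T : List Char) : Bool :=
  (List.range T.length).all fun k => decide (k = 0) || (T[k]? != some '(' && T[k]? != some '[')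


theorem pv_preserve (T : List Char) (hI : pvInnerB T = true) (t r : List Char) (rh : Char)
    (hr : r[0]? = some rh) (hrh : rh = '(' ∨ rh = '[') (c : Char) (s : List Char)
    (hT : ¬ T <+: c :: s) : ¬ T <+: c :: pvRepl t r s := by
  rcases pv_agree t r rh hr s with he | ⟨p, htk, hp⟩
  · rw [he]; exact hT
  · intro hpre
    have hTeq : T = (c :: pvRepl t r s).take T.length := List.prefix_iff_eq_take.mp hpre
    by_cases hL : T.length ≤ p + 1
    · apply hT
      rw [List.prefix_iff_eq_take]
      conv_lhs => rw [hTeq]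
      cases hTL : T.length with
      | zero => simp
      | succ m =>
        simp only [List.take_succ_cons]
        congr 1
        have hmp : m ≤ p := by omega
        have h1 := congrArg (List.take m) htk
        simpa [List.take_take, Nat.min_eq_left hmp] using h1
    · rw [Nat.not_le] at hL
      have h2 : T[p + 1]? = some rh := by
        rw [hTeq, List.getElem?_take, if_pos hL, List.getElem?_cons_succ, hp]
      have h3 := by
        simpa only [pvInnerB, List.all_eq_true, List.mem_range] using hI
      have h4 := h3 (p + 1) (by
        rcases List.getElem?_eq_some_iff.mp (hTeq ▸ h2) with ⟨hlt, _⟩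
        exact List.getElem?_eq_some_iff.mp h2 |>.1)
      simp only [decide_eq_true_eq, Bool.or_eq_true, Bool.and_eq_true, bne_iff_ne] at h4
      rcases h4 with h4 | ⟨h5, h6⟩
      · omega
      · rcases hrh with rfl | rfl
        · exact h5 (by rw [h2])
        · exact h6 (by rw [h2])


-- evaluation of the scanner when a token matches at the head
theorem pvScan_tok1 (rest : List Char) :
    pvScan ("[BUTTON_ADD]".toList ++ rest) = "(Button: Add)".toList ++ pvScan rest := by
  rw [show "[BUTTON_ADD]".toList ++ rest = '[' :: ('B'::'U'::'T'::'T'::'O'::'N'::'_'::'A'::'D'::'D'::']'::rest) from rfl, pvScan]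
  rw [show pvTryTokens pvConversions ('[' :: ('B'::'U'::'T'::'T'::'O'::'N'::'_'::'A'::'D'::'D'::']'::rest))
      = some ("(Button: Add)".toList, 12) from rfl]
  rfl

theorem pvScan_tok2 (rest : List Char) :
    pvScan ("[BUTTON_DELETE]".toList ++ rest) = "(Button: Delete)".toList ++ pvScan rest := by
  rw [show "[BUTTON_DELETE]".toList ++ rest = '[' :: ('B'::'U'::'T'::'T'::'O'::'N'::'_'::'D'::'E'::'L'::'E'::'T'::'E'::']'::rest) from rfl, pvScan]
  rw [show pvTryTokens pvConversions ('[' :: ('B'::'U'::'T'::'T'::'O'::'N'::'_'::'D'::'E'::'L'::'E'::'T'::'E'::']'::rest))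
      = some ("(Button: Delete)".toList, 15) from rfl]
  rfl

theorem pvScan_tok3 (rest : List Char) :
    pvScan ("[PROGRESS_BAR]".toList ++ rest) = "[Progress: XXXXXXXXXX]".toList ++ pvScan rest := by
  rw [show "[PROGRESS_BAR]".toList ++ rest = '[' :: ('P'::'R'::'O'::'G'::'R'::'E'::'S'::'S'::'_'::'B'::'A'::'R'::']'::rest) from rfl, pvScan]
  rw [show pvTryTokens pvConversions ('[' :: ('P'::'R'::'O'::'G'::'R'::'E'::'S'::'S'::'_'::'B'::'A'::'R'::']'::rest))
      = some ("[Progress: XXXXXXXXXX]".toList, 14) from rfl]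
  rfl

theorem pvScan_tok4 (rest : List Char) :
    pvScan ("[CHECKBOX]".toList ++ rest) = "[ ]".toList ++ pvScan rest := by
  rw [show "[CHECKBOX]".toList ++ rest = '[' :: ('C'::'H'::'E'::'C'::'K'::'B'::'O'::'X'::']'::rest) from rfl, pvScan]
  rw [show pvTryTokens pvConversions ('[' :: ('C'::'H'::'E'::'C'::'K'::'B'::'O'::'X'::']'::rest))
      = some ("[ ]".toList, 10) from rfl]
  rfl

theorem pvScan_tok5 (rest : List Char) :
    pvScan ("[CHECKED_BOX]".toList ++ rest) = "[X]".toList ++ pvScan rest := by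
  rw [show "[CHECKED_BOX]".toList ++ rest = '[' :: ('C'::'H'::'E'::'C'::'K'::'E'::'D'::'_'::'B'::'O'::'X'::']'::rest) from rfl, pvScan]
  rw [show pvTryTokens pvConversions ('[' :: ('C'::'H'::'E'::'C'::'K'::'E'::'D'::'_'::'B'::'O'::'X'::']'::rest))
      = some ("[X]".toList, 13) from rfl]
  rfl


-- evaluation of the scanner when no token matches at the head
theorem pvScan_miss (c : Char) (u : List Char)
    (h1 : ¬ "[BUTTON_ADD]".toList <+: c :: u)
    (h2 : ¬ "[BUTTON_DELETE]".toList <+: c :: u)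
    (h3 : ¬ "[PROGRESS_BAR]".toList <+: c :: u)
    (h4 : ¬ "[CHECKBOX]".toList <+: c :: u)
    (h5 : ¬ "[CHECKED_BOX]".toList <+: c :: u) :
    pvScan (c :: u) = c :: pvScan u := by
  have bf : ∀ t : List Char, ¬ t <+: c :: u → t.isPrefixOf (c :: u) = false := by
    intro t ht
    rw [Bool.eq_false_iff]
    intro hb
    exact ht (List.isPrefixOf_iff_prefix.mp hb)
  rw [pvScan, show pvTryTokens pvConversions (c :: u) = none from by
    simp only [pvTryTokens, pvConversions, bf _ h1, bf _ h2, bf _ h3, bf _ h4, bf _ h5,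
      Bool.false_eq_true, if_false]]


-- the five sequential replace passes equal the single scan
theorem pv_chain : ∀ (n : Nat) (s : List Char), s.length ≤ n →
    pvRepl "[CHECKED_BOX]".toList "[X]".toList
      (pvRepl "[CHECKBOX]".toList "[ ]".toList
        (pvRepl "[PROGRESS_BAR]".toList "[Progress: XXXXXXXXXX]".toList
          (pvRepl "[BUTTON_DELETE]".toList "(Button: Delete)".toList
            (pvRepl "[BUTTON_ADD]".toList "(Button: Add)".toList s)))) = pvScan s := by
  intro n
  induction n with
  | zero =>
    intro s hs
    have hs0 : s = [] := by cases s with | nil => rfl | cons a b => simp at hs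
    subst hs0
    rw [pvScan]
    rw [pvRepl, pvRepl, pvRepl, pvRepl, pvRepl]
  | succ n ih =>
    intro s hs
    cases s with
    | nil => rw [pvScan]; rw [pvRepl, pvRepl, pvRepl, pvRepl, pvRepl]
    | cons c u =>
      by_cases h1 : "[BUTTON_ADD]".toList <+: c :: u
      · obtain ⟨rest, hrest⟩ := h1
        rw [← hrest]
        rw [pv_headMatch _ _ _ (by decide)]
        rw [pv_factor _ _ _ _ (by decide), pv_factor _ _ _ _ (by decide),
            pv_factor _ _ _ _ (by decide), pv_factor _ _ _ _ (by decide)]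
        rw [pvScan_tok1, ih rest (by
          have := congrArg List.length hrest
          simp at this hs
          omega)]
      · by_cases h2 : "[BUTTON_DELETE]".toList <+: c :: u
        · obtain ⟨rest, hrest⟩ := h2
          rw [← hrest]
          rw [pv_factor _ _ _ _ (by decide)]
          rw [pv_headMatch _ _ _ (by decide)]
          rw [pv_factor _ _ _ _ (by decide), pv_factor _ _ _ _ (by decide),
              pv_factor _ _ _ _ (by decide)]
          rw [pvScan_tok2, ih rest (by
            have := congrArg List.length hrest
            simp at this hs
            omega)]
        · by_cases h3 : "[PROGRESS_BAR]".toList <+: c :: u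
          · obtain ⟨rest, hrest⟩ := h3
            rw [← hrest]
            rw [pv_factor _ _ _ _ (by decide), pv_factor _ _ _ _ (by decide)]
            rw [pv_headMatch _ _ _ (by decide)]
            rw [pv_factor _ _ _ _ (by decide), pv_factor _ _ _ _ (by decide)]
            rw [pvScan_tok3, ih rest (by
              have := congrArg List.length hrest
              simp at this hs
              omega)]
          · by_cases h4 : "[CHECKBOX]".toList <+: c :: u
            · obtain ⟨rest, hrest⟩ := h4
              rw [← hrest]
              rw [pv_factor _ _ _ _ (by decide), pv_factor _ _ _ _ (by decide),
                  pv_factor _ _ _ _ (by decide)]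
              rw [pv_headMatch _ _ _ (by decide)]
              rw [pv_factor _ _ _ _ (by decide)]
              rw [pvScan_tok4, ih rest (by
                have := congrArg List.length hrest
                simp at this hs
                omega)]
            · by_cases h5 : "[CHECKED_BOX]".toList <+: c :: u
              · obtain ⟨rest, hrest⟩ := h5
                rw [← hrest]
                rw [pv_factor _ _ _ _ (by decide), pv_factor _ _ _ _ (by decide),
                    pv_factor _ _ _ _ (by decide), pv_factor _ _ _ _ (by decide)]
                rw [pv_headMatch _ _ _ (by decide)]
                rw [pvScan_tok5, ih rest (by
                  have := congrArg List.length hrest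
                  simp at this hs
                  omega)]
              · -- no token matches at the head
                rw [pv_headMiss _ _ _ _ h1]
                have h2a := pv_preserve _ (by decide) "[BUTTON_ADD]".toList "(Button: Add)".toList '(' (by decide) (Or.inl rfl) c u h2
                rw [pv_headMiss _ _ _ _ h2a]
                have h3a := pv_preserve _ (by decide) "[BUTTON_ADD]".toList "(Button: Add)".toList '(' (by decide) (Or.inl rfl) c u h3
                have h3b := pv_preserve _ (by decide) "[BUTTON_DELETE]".toList "(Button: Delete)".toList '(' (by decide) (Or.inl rfl) c _ h3a
                rw [pv_headMiss _ _ _ _ h3b]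
                have h4a := pv_preserve _ (by decide) "[BUTTON_ADD]".toList "(Button: Add)".toList '(' (by decide) (Or.inl rfl) c u h4
                have h4b := pv_preserve _ (by decide) "[BUTTON_DELETE]".toList "(Button: Delete)".toList '(' (by decide) (Or.inl rfl) c _ h4a
                have h4c := pv_preserve _ (by decide) "[PROGRESS_BAR]".toList "[Progress: XXXXXXXXXX]".toList '[' (by decide) (Or.inr rfl) c _ h4b
                rw [pv_headMiss _ _ _ _ h4c]
                have h5a := pv_preserve _ (by decide) "[BUTTON_ADD]".toList "(Button: Add)".toList '(' (by decide) (Or.inl rfl) c u h5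
                have h5b := pv_preserve _ (by decide) "[BUTTON_DELETE]".toList "(Button: Delete)".toList '(' (by decide) (Or.inl rfl) c _ h5a
                have h5c := pv_preserve _ (by decide) "[PROGRESS_BAR]".toList "[Progress: XXXXXXXXXX]".toList '[' (by decide) (Or.inr rfl) c _ h5b
                have h5d := pv_preserve _ (by decide) "[CHECKBOX]".toList "[ ]".toList '[' (by decide) (Or.inr rfl) c _ h5c
                rw [pv_headMiss _ _ _ _ h5d]
                rw [pvScan_miss c u h1 h2 h3 h4 h5]
                rw [ih u (by simp at hs; omega)]


-- ===== VERDICT (by name: the statement is the Claim_ definition above) =====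
theorem convert_graphics_to_text_py_spec : Claim_equal_convert_graphics_to_text_py := by
  unfold Claim_equal_convert_graphics_to_text_py Spec_convert_graphics_to_text_py
  intro content _
  have hA : (convert_graphics_to_text_py content).toList
      = pvRepl "[CHECKED_BOX]".toList "[X]".toList
          (pvRepl "[CHECKBOX]".toList "[ ]".toList
            (pvRepl "[PROGRESS_BAR]".toList "[Progress: XXXXXXXXXX]".toList
              (pvRepl "[BUTTON_DELETE]".toList "(Button: Delete)".toList
                (pvRepl "[BUTTON_ADD]".toList "(Button: Add)".toList content.toList)))) := by
    show (PySem.Str.replace _ _ _).toList = _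
    rw [PySem.Str.toList_replace, PySem.Str.toList_replace, PySem.Str.toList_replace,
      PySem.Str.toList_replace, PySem.Str.toList_replace]
    rw [pv_replace_eq _ _ _ (by decide), pv_replace_eq _ _ _ (by decide),
      pv_replace_eq _ _ _ (by decide), pv_replace_eq _ _ _ (by decide),
      pv_replace_eq _ _ _ (by decide)]
  have h := pv_chain content.toList.length content.toList (le_refl _)
  calc convert_graphics_to_text_py content
      = String.ofList (convert_graphics_to_text_py content).toList := String.ofList_toList.symm
    _ = convert_graphics_to_text_py_alt content := by rw [hA, h]; rfl
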